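-- pv_equiv track=rewrite | github.com/lisading/advent-of-code-2018 | Day2 Inventory Management System/checksum.py | get_cur_check_sum
-- ===== SOURCE A (Python) =====
-- def get_cur_check_sum(box_id, twice_appearance, three_times_appearance):
--     letter_list = list(box_id)
--     letter_dict = {}
--     for letter in letter_list:
--         if letter in letter_dict:
--             letter_dict[letter] += 1
--         else:
--             letter_dict[letter] = 1
--
--     twice_appearance_flag = False
--     three_times_appearance_flag = False
--
--     for letter in letter_dict:
--         if letter_dict[letter] == 2 and not twice_appearance_flag:
--             twice_appearance += 1
--             twice_appearance_flag = True
--         elif letter_dict[letter] == 3 and not three_times_appearance_flag: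
--             three_times_appearance += 1
--             three_times_appearance_flag = True
--
--     return twice_appearance, three_times_appearance
-- ===== SOURCE B (Python) =====
-- def get_cur_check_sum(box_id, twice_appearance, three_times_appearance):
--     # sort the characters and walk consecutive runs: each run length is the
--     # frequency of one character, so check run lengths for 2 and 3.
--     has2 = False
--     has3 = False
--     prev = None
--     run = 0
--     for ch in sorted(box_id):
--         if prev == ch:
--             run += 1
--         else:
--             if run == 2:
--                 has2 = True
--             if run == 3:
--                 has3 = True
--             prev = ch
--             run = 1
--     if run == 2:
--         has2 = True
--     if run == 3:
--         has3 = True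
--     if has2:
--         twice_appearance += 1
--     if has3:
--         three_times_appearance += 1
--     return twice_appearance, three_times_appearance
-- ===== Notes on version B (the rewrite author's own statement) =====
-- stated objective: alternative
-- what changed: Replaces the frequency-dict build plus flagged dict scan with a sort-then-run-walk: sort the characters, track the current character's run length in one pass, and set the 2/3 flags from run lengths.
import Mathlib
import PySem

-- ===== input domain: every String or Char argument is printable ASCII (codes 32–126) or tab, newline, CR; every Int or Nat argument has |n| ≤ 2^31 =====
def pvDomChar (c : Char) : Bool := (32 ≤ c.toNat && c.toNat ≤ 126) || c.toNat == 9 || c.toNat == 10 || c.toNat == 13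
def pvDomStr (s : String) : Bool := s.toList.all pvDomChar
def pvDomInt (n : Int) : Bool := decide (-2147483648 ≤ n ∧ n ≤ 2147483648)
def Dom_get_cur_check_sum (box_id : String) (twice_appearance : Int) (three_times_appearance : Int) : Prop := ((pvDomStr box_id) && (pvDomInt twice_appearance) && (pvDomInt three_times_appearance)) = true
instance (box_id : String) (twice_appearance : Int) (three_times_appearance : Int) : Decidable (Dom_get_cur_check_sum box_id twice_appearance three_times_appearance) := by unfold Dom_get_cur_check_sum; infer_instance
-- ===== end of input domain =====

-- B replaces A's frequency-dict build plus flagged dict scan by sorting the characters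
-- and walking consecutive runs, reading the 2/3 flags off the run lengths (objective: alternative).

-- ===== PORT A =====
-- the body of A's second loop (flags + counters), as a helper so lemmas can name it
def pvStepA (lookup : Char → Int) (st : Bool × Bool × Int × Int) (letter : Char) : Bool × Bool × Int × Int :=
  if lookup letter == 2 && !st.1 then (true, st.2.1, st.2.2.1 + 1, st.2.2.2)
  else if lookup letter == 3 && !st.2.1 then (st.1, true, st.2.2.1, st.2.2.2 + 1)
  else st

def get_cur_check_sum (box_id : String) (twice_appearance : Int) (three_times_appearance : Int) : Int × Int :=
  let letter_list := box_id.toList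
  let letter_dict := letter_list.foldl
    (fun d letter =>
      if d.contains letter then d.insert letter (d.getD letter 0 + 1)
      else d.insert letter 1)
    (PySem.Dict.empty : PySem.Dict Char Int)
  let r := letter_dict.keys.foldl (pvStepA (fun letter => letter_dict.getD letter 0))
    (false, false, twice_appearance, three_times_appearance)
  (r.2.2.1, r.2.2.2)

-- ===== PORT B =====
-- B's loop body: state (prev, run, has2, has3), exactly Source B's branch
def pvStepB (st : Option Char × Int × Bool × Bool) (ch : Char) : Option Char × Int × Bool × Bool :=
  if st.1 == some ch then (st.1, st.2.1 + 1, st.2.2.1, st.2.2.2)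
  else (some ch, 1, st.2.2.1 || (st.2.1 == 2), st.2.2.2 || (st.2.1 == 3))

-- Source B's trailing flush of the final run (the two ifs after the loop)
def pvFlush (st : Option Char × Int × Bool × Bool) : Bool × Bool :=
  (st.2.2.1 || (st.2.1 == 2), st.2.2.2 || (st.2.1 == 3))

def get_cur_check_sum_alt (box_id : String) (twice_appearance : Int) (three_times_appearance : Int) : Int × Int :=
  let st := (PySem.List.sorted box_id.toList (fun c => c) false).foldl pvStepB (none, 0, false, false)
  let f := pvFlush st
  ((if f.1 then twice_appearance + 1 else twice_appearance),
   (if f.2 then three_times_appearance + 1 else three_times_appearance))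

-- ===== PRECONDITION & SPEC =====
def Spec_get_cur_check_sum (box_id : String) (twice_appearance : Int) (three_times_appearance : Int) (out : Int × Int) : Prop := out = get_cur_check_sum_alt box_id twice_appearance three_times_appearance
instance (box_id : String) (twice_appearance : Int) (three_times_appearance : Int) (out : Int × Int) : Decidable (Spec_get_cur_check_sum box_id twice_appearance three_times_appearance out) := by unfold Spec_get_cur_check_sum; infer_instance

-- ===== CLAIM (what is proved, stated in full; the proofs are below) =====
def Claim_equal_get_cur_check_sum : Prop := ∀ (box_id : String) (twice_appearance : Int) (three_times_appearance : Int), Dom_get_cur_check_sum box_id twice_appearance three_times_appearance → Spec_get_cur_check_sum box_id twice_appearance three_times_appearance (get_cur_check_sum box_id twice_appearance three_times_appearance)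

-- ===== LEMMAS AND PROOFS =====

-- A's dict-building loop (with its membership branch) is exactly Counter(letters).
theorem buildA_eq_counter (cs : List Char) :
    cs.foldl
      (fun d letter =>
        if d.contains letter then d.insert letter (d.getD letter 0 + 1)
        else d.insert letter 1)
      (PySem.Dict.empty : PySem.Dict Char Int) = PySem.Dict.counter cs := by
  rw [← PySem.Dict.foldl_insert_getD_add_one_eq_counter]
  congr 1
  funext d letter
  by_cases h : d.contains letter = true
  · simp [h]
  · simp only [Bool.not_eq_true] at h
    simp [h, PySem.Dict.getD_of_not_contains _ _ h]

-- A's flagged scan, characterised: each key hits at most one branch (2 ≠ 3), so the loop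
-- adds 1 iff some key has count 2 and 1 iff some key has count 3.
theorem flagLoop (g : Char → Int) (ks : List Char) (f2 f3 : Bool) (t2 t3 : Int) :
    ks.foldl (pvStepA g) (f2, f3, t2, t3)
    = (f2 || ks.any (fun k => g k == 2), f3 || ks.any (fun k => g k == 3),
       t2 + (if !f2 && ks.any (fun k => g k == 2) then 1 else 0),
       t3 + (if !f3 && ks.any (fun k => g k == 3) then 1 else 0)) := by
  induction ks generalizing f2 f3 t2 t3 with
  | nil => simp
  | cons k ks ih =>
    rw [List.foldl_cons]
    by_cases h2 : g k = 2
    · have h3 : ¬ g k = 3 := by omega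
      cases f2 with
      | false =>
        have e : pvStepA g (false, f3, t2, t3) k = (true, f3, t2 + 1, t3) := by
          simp [pvStepA, h2]
        rw [e, ih]; simp [h2]
      | true =>
        have e : pvStepA g (true, f3, t2, t3) k = (true, f3, t2, t3) := by
          simp [pvStepA, h2]
        rw [e, ih]; simp [h2]
    · by_cases h3 : g k = 3
      · cases f3 with
        | false =>
          have e : pvStepA g (f2, false, t2, t3) k = (f2, true, t2, t3 + 1) := by
            simp [pvStepA, h3]
          rw [e, ih]; simp [h3]
        | true =>
          have e : pvStepA g (f2, true, t2, t3) k = (f2, true, t2, t3) := by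
            simp [pvStepA, h3]
          rw [e, ih]; simp [h3]
      · have e : pvStepA g (f2, f3, t2, t3) k = (f2, f3, t2, t3) := by
          simp [pvStepA, h2, h3]
        have b2 : (g k == 2) = false := by simp [h2]
        have b3 : (g k == 3) = false := by simp [h3]
        rw [e, ih]; simp [b2, b3]

-- run-view bookkeeping: continuing the current run of p absorbs one occurrence of p
theorem side_self (t : List Char) (p : Char) (r m : Int) (h : Bool) :
    (h || (r + 1 + (t.count p : Int) == m) || t.any (fun d => !(d == p) && ((t.count d : Int) == m)))
    = (h || (r + (((p :: t).count p : Nat) : Int) == m) || (p :: t).any (fun d => !(d == p) && (((p :: t).count d : Int) == m))) := by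
  rw [List.count_cons_self, Bool.eq_iff_iff]
  simp only [Bool.or_eq_true, List.any_eq_true, Bool.and_eq_true, beq_iff_eq,
    Bool.not_eq_eq_eq_not, Bool.not_true, beq_eq_false_iff_ne, List.mem_cons, ne_eq]
  constructor
  · rintro ((hh | hh) | ⟨x, hx, hne, hcnt⟩)
    · exact Or.inl (Or.inl hh)
    · left; right; push_cast at hh ⊢; omega
    · exact Or.inr ⟨x, Or.inr hx, hne, by rw [List.count_cons_of_ne (Ne.symm hne)]; exact hcnt⟩
  · rintro ((hh | hh) | ⟨x, hx | hx, hne, hcnt⟩)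
    · exact Or.inl (Or.inl hh)
    · left; right; push_cast at hh ⊢; omega
    · exact absurd hx hne
    · exact Or.inr ⟨x, hx, hne, by rw [List.count_cons_of_ne (Ne.symm hne)] at hcnt; exact hcnt⟩

-- run-view bookkeeping: starting a fresh run at c flushes the finished run of p
theorem side_new (t : List Char) (p c : Char) (r m : Int) (h : Bool)
    (hcp : c ≠ p) (hpt : p ∉ t) :
    ((h || (r == m)) || (1 + (t.count c : Int) == m) || t.any (fun d => !(d == c) && ((t.count d : Int) == m)))
    = (h || (r + (((c :: t).count p : Nat) : Int) == m) || (c :: t).any (fun d => !(d == p) && (((c :: t).count d : Int) == m))) := by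
  have hpn : p ∉ c :: t := by
    intro hmem
    rcases List.mem_cons.mp hmem with hh | hh
    · exact hcp hh.symm
    · exact hpt hh
  have hcnt0 : (c :: t).count p = 0 := List.count_eq_zero.mpr hpn
  rw [hcnt0, Bool.eq_iff_iff]
  simp only [Bool.or_eq_true, List.any_eq_true, Bool.and_eq_true, beq_iff_eq,
    Bool.not_eq_eq_eq_not, Bool.not_true, beq_eq_false_iff_ne, List.mem_cons, ne_eq]
  constructor
  · rintro (((hh | hh) | hh) | ⟨x, hx, hne, hcnt⟩)
    · exact Or.inl (Or.inl hh)
    · left; right; push_cast; omega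
    · right
      refine ⟨c, Or.inl rfl, hcp, ?_⟩
      rw [List.count_cons_self]; push_cast at hh ⊢; omega
    · right
      refine ⟨x, Or.inr hx, fun hxp => hpt (hxp ▸ hx), ?_⟩
      rw [List.count_cons_of_ne (Ne.symm hne)]; exact hcnt
  · rintro ((hh | hh) | ⟨x, hx, hxp, hcnt⟩)
    · exact Or.inl (Or.inl (Or.inl hh))
    · left; left; right; push_cast at hh; omega
    · rcases hx with rfl | hx
      · left; right
        rw [List.count_cons_self] at hcnt; push_cast at hcnt ⊢; omega
      · by_cases hxc : x = c
        · subst hxc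
          left; right
          rw [List.count_cons_self] at hcnt; push_cast at hcnt ⊢; omega
        · right
          exact ⟨x, hx, hxc, by rw [List.count_cons_of_ne (Ne.symm hxc)] at hcnt; exact hcnt⟩

-- B's run walk, characterised on a sorted tail: starting mid-run on p with length-so-far r,
-- the flushed flags report whether r + (p's remaining count) or some later char's count hits the target.
theorem runFold (l : List Char) (p : Char) (r : Int) (h2 h3 : Bool)
    (hs : l.Pairwise (· ≤ ·)) (hp : ∀ x ∈ l, p ≤ x) :
    pvFlush (l.foldl pvStepB (some p, r, h2, h3))
    = (h2 || (r + (l.count p : Int) == 2) || l.any (fun c => !(c == p) && ((l.count c : Int) == 2)),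
       h3 || (r + (l.count p : Int) == 3) || l.any (fun c => !(c == p) && ((l.count c : Int) == 3))) := by
  induction l generalizing p r h2 h3 with
  | nil => simp [pvFlush]
  | cons c t ih =>
    rcases List.pairwise_cons.mp hs with ⟨hc, ht⟩
    by_cases hcp : c = p
    · subst hcp
      have e : pvStepB (some c, r, h2, h3) c = (some c, r + 1, h2, h3) := by
        simp [pvStepB]
      rw [List.foldl_cons, e, ih c (r + 1) h2 h3 ht hc, Prod.mk.injEq]
      exact ⟨side_self t c r 2 h2, side_self t c r 3 h3⟩
    · have hlt : p < c := lt_of_le_of_ne (hp c (List.mem_cons_self ..)) (Ne.symm hcp)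
      have hpt : p ∉ t := fun hh => absurd (hc p hh) (not_le.mpr hlt)
      have e : pvStepB (some p, r, h2, h3) c = (some c, 1, h2 || (r == 2), h3 || (r == 3)) := by
        simp [pvStepB, Ne.symm hcp]
      rw [List.foldl_cons, e, ih c 1 (h2 || (r == 2)) (h3 || (r == 3)) ht hc, Prod.mk.injEq]
      exact ⟨side_new t p c r 2 h2 hcp hpt, side_new t p c r 3 h3 hcp hpt⟩

-- bridging the two "some character occurs exactly m times" tests: run view of the
-- sorted list (head run + later runs) versus A's scan over the distinct keys.
theorem run_any (c : Char) (t : List Char) (l : List Char) (m : Int)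
    (hperm : (c :: t).Perm l) :
    ((1 + (t.count c : Int) == m) || t.any (fun d => !(d == c) && ((t.count d : Int) == m)))
    = (PySem.Set.ofList l).any (fun k => ((l.count k : Int) == m)) := by
  have hm : ∀ x, l.count x = (c :: t).count x := fun x => (hperm.count_eq x).symm
  have hmem : ∀ x, x ∈ l ↔ x ∈ c :: t := fun x => hperm.mem_iff.symm
  rw [Bool.eq_iff_iff]
  simp only [Bool.or_eq_true, List.any_eq_true, Bool.and_eq_true, beq_iff_eq,
    Bool.not_eq_eq_eq_not, Bool.not_true, beq_eq_false_iff_ne, PySem.Set.mem_ofList, ne_eq]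
  constructor
  · rintro (hh | ⟨x, hx, hne, hcnt⟩)
    · refine ⟨c, (hmem c).mpr (List.mem_cons_self ..), ?_⟩
      rw [hm, List.count_cons_self]; push_cast at hh ⊢; omega
    · refine ⟨x, (hmem x).mpr (List.mem_cons_of_mem _ hx), ?_⟩
      rw [hm, List.count_cons_of_ne (Ne.symm hne)]; exact hcnt
  · rintro ⟨x, hx, hcnt⟩
    rw [hm] at hcnt
    by_cases hxc : x = c
    · subst hxc
      left; rw [List.count_cons_self] at hcnt; push_cast at hcnt ⊢; omega
    · right
      have hx' : x ∈ t := by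
        rcases List.mem_cons.mp ((hmem x).mp hx) with hh | hh
        · exact absurd hh hxc
        · exact hh
      exact ⟨x, hx', hxc, by rw [List.count_cons_of_ne (Ne.symm hxc)] at hcnt; exact hcnt⟩

-- ===== VERDICT (by name: the statement is the Claim_ definition above) =====
theorem get_cur_check_sum_spec : Claim_equal_get_cur_check_sum := by
  intro box_id t2 t3 _
  unfold Spec_get_cur_check_sum get_cur_check_sum get_cur_check_sum_alt
  simp only [buildA_eq_counter, PySem.Dict.keys_counter, PySem.Dict.getD_counter, flagLoop,
    Bool.not_false, Bool.true_and]
  set l := box_id.toList with hl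
  have hperm : (PySem.List.sorted l (fun c => c) false).Perm l := PySem.List.sorted_perm ..
  have hpw : (PySem.List.sorted l (fun c => c) false).Pairwise (· ≤ ·) :=
    PySem.List.sorted_pairwise ..
  rcases hse : PySem.List.sorted l (fun c => c) false with _ | ⟨c, t⟩
  · rw [hse] at hperm
    have hlnil : l = [] := hperm.symm.eq_nil
    simp [hlnil, pvFlush, PySem.Set.ofList]
  · rw [hse] at hperm hpw
    rcases List.pairwise_cons.mp hpw with ⟨hc, ht⟩
    have e0 : pvStepB (none, 0, false, false) c = (some c, 1, false, false) := by
      simp [pvStepB]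
    rw [List.foldl_cons, e0, runFold t c 1 false false ht hc]
    simp only [Bool.false_or]
    rw [run_any c t l 2 hperm, run_any c t l 3 hperm]
    split_ifs <;> simp
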